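-- pv_equiv track=rewrite | github.com/elainehuang1125/CUBE | sort.py | func
-- ===== SOURCE A (Python) =====
-- def func(nums):
--     nums_new = []
--     nums_new1 = []
--     for i in nums:
--         if i % 2 == 1:
--             nums_new.insert(0, i)
--             nums_new = sorted(nums_new, key=lambda x: -x)
--         else:
--             nums_new1.insert(0, i)
--             nums_new1 = sorted(nums_new1, key= lambda x: x%10)
--
--     nums_combined = nums_new + nums_new1
--
--     return nums_combined
-- ===== SOURCE B (Python) =====
-- def func(nums):
--     # odds descending; evens by bucket/distribution sort on the last digit
--     odds = sorted((x for x in nums if x % 2 == 1), key=lambda x: -x)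
--     evens = []
--     for r in (0, 2, 4, 6, 8):
--         evens.extend(reversed([x for x in nums if x % 2 == 0 and x % 10 == r]))
--     return odds + evens
-- ===== Notes on version B (the rewrite author's own statement) =====
-- stated objective: faster
-- what changed: Instead of re-sorting the accumulators on every iteration, B sorts the odd elements once and replaces the comparison sort of the evens by a bucket (distribution) sort on the last digit, prepending within buckets to reproduce A's stable order.
import Mathlib
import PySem

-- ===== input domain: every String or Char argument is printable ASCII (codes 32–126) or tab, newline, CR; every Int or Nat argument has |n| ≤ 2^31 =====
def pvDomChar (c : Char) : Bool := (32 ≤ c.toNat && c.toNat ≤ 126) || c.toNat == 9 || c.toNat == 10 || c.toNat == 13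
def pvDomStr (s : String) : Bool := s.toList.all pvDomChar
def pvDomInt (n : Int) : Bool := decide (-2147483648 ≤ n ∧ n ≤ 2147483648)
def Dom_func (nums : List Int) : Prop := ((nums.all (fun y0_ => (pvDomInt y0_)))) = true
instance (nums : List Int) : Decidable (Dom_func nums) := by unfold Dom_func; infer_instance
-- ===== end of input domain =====

-- B replaces A's per-element re-sorting by one sort of the odds plus a bucket
-- (distribution) sort of the evens on their last digit (objective: faster).

-- ===== PORT A =====
-- A keeps two accumulators; each element is inserted at index 0 and the
-- accumulator re-sorted (odds by key -x, evens by key x % 10).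
def func (nums : List Int) : List Int :=
  let st := nums.foldl
    (fun (s : List Int × List Int) i =>
      if PySem.Int.mod i 2 == 1 then
        (PySem.List.sorted (i :: s.1) (fun x => -x) false, s.2)
      else
        (s.1, PySem.List.sorted (i :: s.2) (fun x => PySem.Int.mod x 10) false))
    ([], [])
  st.1 ++ st.2

-- ===== PORT B =====
-- B: sort the odds once (key -x); bucket the evens by last digit,
-- each bucket in reverse encounter order; concatenate.
def func_alt (nums : List Int) : List Int :=
  let odds := PySem.List.sorted
    (nums.filter (fun x => PySem.Int.mod x 2 == 1)) (fun x => -x) false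
  let evens := ([0, 2, 4, 6, 8] : List Int).foldl
    (fun acc r =>
      acc ++ (nums.filter
        (fun x => PySem.Int.mod x 2 == 0 && PySem.Int.mod x 10 == r)).reverse) []
  odds ++ evens

-- ===== PRECONDITION & SPEC =====
def Spec_func (nums : List Int) (out : List Int) : Prop := out = func_alt nums
instance (nums : List Int) (out : List Int) : Decidable (Spec_func nums out) := by unfold Spec_func; infer_instance

-- ===== CLAIM (what is proved, stated in full; the proofs are below) =====
def Claim_equal_func : Prop := ∀ (nums : List Int), Dom_func nums → Spec_func nums (func nums)

-- ===== LEMMAS AND PROOFS =====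

-- the even-side buckets, as a function of the list of evens seen so far
def evBucket (m : List Int) (r : Int) : List Int :=
  (m.filter (fun x => PySem.Int.mod x 10 == r)).reverse

def evShape (m : List Int) : List Int :=
  ([0, 2, 4, 6, 8] : List Int).flatMap (fun r => evBucket m r)

lemma mem_evBucket {m : List Int} {r x : Int} (h : x ∈ evBucket m r) :
    PySem.Int.mod x 10 = r := by
  simp only [evBucket, List.mem_reverse, List.mem_filter, beq_iff_eq] at h
  exact h.2

-- insertBy walks past a prefix it is not 'before'
lemma insertBy_append_of_not_before {α : Type} (before : α → α → Bool) (x : α)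
    (A B : List α) (h : ∀ y ∈ A, before x y = false) :
    PySem.List.insertBy before x (A ++ B) = A ++ PySem.List.insertBy before x B := by
  induction A with
  | nil => simp
  | cons a t ih =>
      simp only [List.cons_append, PySem.List.insertBy, h a (by simp)]
      rw [ih (fun y hy => h y (by simp [hy]))]
      simp

lemma takeWhile_append_all_true {α : Type} (p : α → Bool) (A B : List α)
    (h : ∀ y ∈ A, p y = true) :
    (A ++ B).takeWhile p = A ++ B.takeWhile p ∧ (A ++ B).dropWhile p = B.dropWhile p := by
  induction A with
  | nil => simp
  | cons a t ih =>
      have := ih (fun y hy => h y (by simp [hy]))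
      simp [h a (by simp), this.1, this.2]

lemma takeWhile_all_false {α : Type} (p : α → Bool) (B : List α)
    (h : ∀ y ∈ B, p y = false) :
    B.takeWhile p = [] ∧ B.dropWhile p = B := by
  cases B with
  | nil => simp
  | cons b t => simp [h b (by simp)]

lemma tw_dw_split {α : Type} (p : α → Bool) (A B : List α)
    (hA : ∀ y ∈ A, p y = true) (hB : ∀ y ∈ B, p y = false) :
    (A ++ B).takeWhile p = A ∧ (A ++ B).dropWhile p = B := by
  obtain ⟨h1, h2⟩ := takeWhile_append_all_true p A B hA
  obtain ⟨h3, h4⟩ := takeWhile_all_false p B hB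
  exact ⟨by rw [h1, h3, List.append_nil], by rw [h2, h4]⟩

lemma tw_dw_append_singleton_false {α : Type} (p : α → Bool) (C : List α) (x : α)
    (hx : p x = false) :
    (C ++ [x]).takeWhile p = C.takeWhile p ∧
      (C ++ [x]).dropWhile p = C.dropWhile p ++ [x] := by
  induction C with
  | nil => simp [hx]
  | cons a t ih =>
      by_cases ha : p a = true
      · simp [ha, ih.1, ih.2]
      · simp only [Bool.not_eq_true] at ha
        simp [ha]

-- the insertion-sort fold inserts one new element stably into a nondecreasing list
lemma foldl_insertBy_acc (key : Int → Int) (i : Int) (C : List Int)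
    (h : C.Pairwise (fun a b => key a ≤ key b)) :
    C.foldl (fun acc x =>
        PySem.List.insertBy (fun a b => decide (key a < key b)) x acc) [i] =
      C.takeWhile (fun y => decide (key y < key i)) ++
        i :: C.dropWhile (fun y => decide (key y < key i)) := by
  induction C using List.reverseRecOn with
  | nil => simp
  | append_singleton C x ih =>
      rw [List.pairwise_append] at h
      have hC : C.Pairwise (fun a b => key a ≤ key b) := h.1
      have hCx : ∀ y ∈ C, key y ≤ key x := fun y hy => h.2.2 y hy x (by simp)
      rw [List.foldl_append, ih hC]
      simp only [List.foldl_cons, List.foldl_nil]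
      by_cases hxi : key x < key i
      · -- x still belongs before i: everything in C is < key i too
        have hallC : ∀ y ∈ C, (fun y => decide (key y < key i)) y = true := by
          intro y hy
          simp only [decide_eq_true_eq]
          exact lt_of_le_of_lt (hCx y hy) hxi
        have htw : C.takeWhile (fun y => decide (key y < key i)) = C :=
          List.takeWhile_eq_self_iff.mpr hallC
        have hdw : C.dropWhile (fun y => decide (key y < key i)) = [] :=
          List.dropWhile_eq_nil_iff.mpr hallC
        have hallCx : ∀ y ∈ C ++ [x], (fun y => decide (key y < key i)) y = true := by
          intro y hy
          rcases List.mem_append.mp hy with hy | hy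
          · exact hallC y hy
          · simp only [List.mem_singleton] at hy
            subst hy; simp only [decide_eq_true_eq]; exact hxi
        rw [htw, hdw, List.takeWhile_eq_self_iff.mpr hallCx,
          List.dropWhile_eq_nil_iff.mpr hallCx]
        rw [insertBy_append_of_not_before _ x C [i]
          (fun y hy => by simp only [decide_eq_false_iff_not, not_lt]; exact hCx y hy)]
        simp [PySem.List.insertBy, hxi]
      · -- x goes to the very end
        have hix : key i ≤ key x := le_of_not_gt hxi
        have h1 : PySem.List.insertBy (fun a b => decide (key a < key b)) x
            (C.takeWhile (fun y => decide (key y < key i)) ++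
              i :: C.dropWhile (fun y => decide (key y < key i))) =
            (C.takeWhile (fun y => decide (key y < key i)) ++
              i :: C.dropWhile (fun y => decide (key y < key i))) ++ [x] := by
          apply PySem.List.insertBy_of_forall_not_before
          intro y hy
          simp only [List.mem_append, List.mem_cons] at hy
          simp only [decide_eq_false_iff_not, not_lt]
          rcases hy with hy | hy | hy
          · exact hCx y ((List.takeWhile_sublist _).mem hy)
          · subst hy; exact hix
          · exact hCx y ((List.dropWhile_sublist _).mem hy)
        have hpx : (fun y => decide (key y < key i)) x = false := by
          simp only [decide_eq_false_iff_not, not_lt]; exact hix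
        obtain ⟨htw, hdw⟩ :=
          tw_dw_append_singleton_false (fun y => decide (key y < key i)) C x hpx
        rw [h1, htw, hdw]
        simp

-- stable insertion into an already nondecreasing list
lemma sorted_cons_of_pairwise (key : Int → Int) (i : Int) (C : List Int)
    (h : C.Pairwise (fun a b => key a ≤ key b)) :
    PySem.List.sorted (i :: C) key false =
      C.takeWhile (fun y => decide (key y < key i)) ++
        i :: C.dropWhile (fun y => decide (key y < key i)) := by
  rw [PySem.List.sorted_eq_foldl_insertBy]
  simp only [List.foldl_cons]
  have h0 : PySem.List.insertBy (fun a b => decide (key a < key b)) i [] = [i] := by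
    simp [PySem.List.insertBy]
  rw [h0, foldl_insertBy_acc key i C h]

lemma pairwise_const_key (r : Int) (b : List Int)
    (hb : ∀ x ∈ b, PySem.Int.mod x 10 = r) :
    b.Pairwise (fun a b => PySem.Int.mod a 10 ≤ PySem.Int.mod b 10) := by
  induction b with
  | nil => exact List.Pairwise.nil
  | cons a t ih =>
      exact List.Pairwise.cons
        (fun y hy => by rw [hb a (by simp), hb y (by simp [hy])])
        (ih (fun y hy => hb y (by simp [hy])))

lemma pairwise_evShape (m : List Int) :
    (evShape m).Pairwise (fun a b => PySem.Int.mod a 10 ≤ PySem.Int.mod b 10) := by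
  have hb : ∀ r : Int, ∀ x ∈ evBucket m r, PySem.Int.mod x 10 = r :=
    fun r x hx => mem_evBucket hx
  have cross : ∀ (r1 r2 : Int), r1 ≤ r2 → ∀ a ∈ evBucket m r1, ∀ b ∈ evBucket m r2,
      PySem.Int.mod a 10 ≤ PySem.Int.mod b 10 := by
    intro r1 r2 h12 a ha b hbm
    rw [hb r1 a ha, hb r2 b hbm]; exact h12
  simp only [evShape, List.flatMap_cons, List.flatMap_nil, List.append_nil]
  refine List.pairwise_append.mpr ⟨pairwise_const_key 0 _ (hb 0),
    List.pairwise_append.mpr ⟨pairwise_const_key 2 _ (hb 2),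
      List.pairwise_append.mpr ⟨pairwise_const_key 4 _ (hb 4),
        List.pairwise_append.mpr ⟨pairwise_const_key 6 _ (hb 6),
          pairwise_const_key 8 _ (hb 8), ?_⟩, ?_⟩, ?_⟩, ?_⟩
  · exact cross 6 8 (by norm_num)
  · intro a ha b hbm
    rcases List.mem_append.mp hbm with hbm | hbm
    · exact cross 4 6 (by norm_num) a ha b hbm
    · exact cross 4 8 (by norm_num) a ha b hbm
  · intro a ha b hbm
    rcases List.mem_append.mp hbm with hbm | hbm
    · exact cross 2 4 (by norm_num) a ha b hbm
    · rcases List.mem_append.mp hbm with hbm | hbm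
      · exact cross 2 6 (by norm_num) a ha b hbm
      · exact cross 2 8 (by norm_num) a ha b hbm
  · intro a ha b hbm
    rcases List.mem_append.mp hbm with hbm | hbm
    · exact cross 0 2 (by norm_num) a ha b hbm
    · rcases List.mem_append.mp hbm with hbm | hbm
      · exact cross 0 4 (by norm_num) a ha b hbm
      · rcases List.mem_append.mp hbm with hbm | hbm
        · exact cross 0 6 (by norm_num) a ha b hbm
        · exact cross 0 8 (by norm_num) a ha b hbm

lemma evBucket_append_eq (m : List Int) (i r : Int) (h : PySem.Int.mod i 10 = r) :
    evBucket (m ++ [i]) r = i :: evBucket m r := by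
  have h' : i % 10 = r := by
    rw [← PySem.Int.mod_eq_emod_of_pos (a := i) (b := 10) (by norm_num)]; exact h
  simp [evBucket, List.filter_append, h']

lemma evBucket_append_ne (m : List Int) (i r : Int) (h : PySem.Int.mod i 10 ≠ r) :
    evBucket (m ++ [i]) r = evBucket m r := by
  have h' : ¬ i % 10 = r := by
    rw [← PySem.Int.mod_eq_emod_of_pos (a := i) (b := 10) (by norm_num)]; exact h
  simp [evBucket, List.filter_append, h']

-- last digit of an even number is 0, 2, 4, 6 or 8
lemma mod10_even {i : Int} (hi : PySem.Int.mod i 2 = 0) :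
    PySem.Int.mod i 10 = 0 ∨ PySem.Int.mod i 10 = 2 ∨ PySem.Int.mod i 10 = 4 ∨
      PySem.Int.mod i 10 = 6 ∨ PySem.Int.mod i 10 = 8 := by
  have h2 : (2 : Int) ∣ i := (PySem.Int.mod_eq_zero_iff_dvd i 2).mp hi
  have hq := PySem.Int.floordiv_mul_add_mod i 10
  have h0 := PySem.Int.mod_nonneg i (b := 10) (by norm_num)
  have h1 := PySem.Int.mod_lt i (b := 10) (by norm_num)
  omega

lemma all_append {α : Type} (p : α → Bool) (A B : List α) (v : Bool)
    (hA : ∀ y ∈ A, p y = v) (hB : ∀ y ∈ B, p y = v) : ∀ y ∈ A ++ B, p y = v := by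
  intro y hy
  rcases List.mem_append.mp hy with h | h
  exacts [hA y h, hB y h]

lemma p_on_bucket (m : List Int) (r' : Int) (i : Int) (v : Bool)
    (hv : decide (r' < PySem.Int.mod i 10) = v) :
    ∀ y ∈ evBucket m r',
      (fun y => decide (PySem.Int.mod y 10 < PySem.Int.mod i 10)) y = v := by
  intro y hy
  simp only
  rw [mem_evBucket hy, hv]

-- inserting an even element into the bucket concatenation prepends it to its bucket
lemma sorted_cons_evShape (m : List Int) (i : Int) (hi : PySem.Int.mod i 2 = 0) :
    PySem.List.sorted (i :: evShape m) (fun x => PySem.Int.mod x 10) false =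
      evShape (m ++ [i]) := by
  rw [sorted_cons_of_pairwise (fun x => PySem.Int.mod x 10) i _ (pairwise_evShape m)]
  rcases mod10_even hi with hr | hr | hr | hr | hr
  · -- last digit 0: i goes before every bucket
    have hall : ∀ y ∈ evShape m, (fun y => decide (PySem.Int.mod y 10 < PySem.Int.mod i 10)) y = false := by
      intro y hy
      simp only [decide_eq_false_iff_not, not_lt, hr]
      exact PySem.Int.mod_nonneg y (by norm_num)
    obtain ⟨htw, hdw⟩ := takeWhile_all_false (fun y => decide (PySem.Int.mod y 10 < PySem.Int.mod i 10)) (evShape m) hall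
    rw [htw, hdw]
    simp only [evShape, List.flatMap_cons, List.flatMap_nil, List.append_nil]
    rw [evBucket_append_eq m i 0 hr,
        evBucket_append_ne m i 2 (by rw [hr]; decide),
        evBucket_append_ne m i 4 (by rw [hr]; decide),
        evBucket_append_ne m i 6 (by rw [hr]; decide),
        evBucket_append_ne m i 8 (by rw [hr]; decide)]
    simp
  · -- last digit 2
    have hsplit : evShape m = evBucket m 0 ++ (evBucket m 2 ++ (evBucket m 4 ++ (evBucket m 6 ++ evBucket m 8))) := by
      simp [evShape, List.flatMap_cons, List.flatMap_nil]
    rw [hsplit]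
    obtain ⟨htw, hdw⟩ := tw_dw_split (fun y => decide (PySem.Int.mod y 10 < PySem.Int.mod i 10)) (evBucket m 0) (evBucket m 2 ++ (evBucket m 4 ++ (evBucket m 6 ++ evBucket m 8)))
      (p_on_bucket m 0 i true (by rw [hr]; decide))
      (all_append (fun y => decide (PySem.Int.mod y 10 < PySem.Int.mod i 10)) (evBucket m 2) (evBucket m 4 ++ (evBucket m 6 ++ evBucket m 8)) false (p_on_bucket m 2 i false (by rw [hr]; decide)) (all_append (fun y => decide (PySem.Int.mod y 10 < PySem.Int.mod i 10)) (evBucket m 4) (evBucket m 6 ++ evBucket m 8) false (p_on_bucket m 4 i false (by rw [hr]; decide)) (all_append (fun y => decide (PySem.Int.mod y 10 < PySem.Int.mod i 10)) (evBucket m 6) (evBucket m 8) false (p_on_bucket m 6 i false (by rw [hr]; decide)) (p_on_bucket m 8 i false (by rw [hr]; decide)))))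
    rw [htw, hdw]
    simp only [evShape, List.flatMap_cons, List.flatMap_nil, List.append_nil]
    rw [evBucket_append_ne m i 0 (by rw [hr]; decide),
        evBucket_append_eq m i 2 hr,
        evBucket_append_ne m i 4 (by rw [hr]; decide),
        evBucket_append_ne m i 6 (by rw [hr]; decide),
        evBucket_append_ne m i 8 (by rw [hr]; decide)]
    simp
  · -- last digit 4
    have hsplit : evShape m = (evBucket m 0 ++ evBucket m 2) ++ (evBucket m 4 ++ (evBucket m 6 ++ evBucket m 8)) := by
      simp [evShape, List.flatMap_cons, List.flatMap_nil, List.append_assoc]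
    rw [hsplit]
    obtain ⟨htw, hdw⟩ := tw_dw_split (fun y => decide (PySem.Int.mod y 10 < PySem.Int.mod i 10)) (evBucket m 0 ++ evBucket m 2) (evBucket m 4 ++ (evBucket m 6 ++ evBucket m 8))
      (all_append (fun y => decide (PySem.Int.mod y 10 < PySem.Int.mod i 10)) (evBucket m 0) (evBucket m 2) true (p_on_bucket m 0 i true (by rw [hr]; decide)) (p_on_bucket m 2 i true (by rw [hr]; decide)))
      (all_append (fun y => decide (PySem.Int.mod y 10 < PySem.Int.mod i 10)) (evBucket m 4) (evBucket m 6 ++ evBucket m 8) false (p_on_bucket m 4 i false (by rw [hr]; decide)) (all_append (fun y => decide (PySem.Int.mod y 10 < PySem.Int.mod i 10)) (evBucket m 6) (evBucket m 8) false (p_on_bucket m 6 i false (by rw [hr]; decide)) (p_on_bucket m 8 i false (by rw [hr]; decide))))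
    rw [htw, hdw]
    simp only [evShape, List.flatMap_cons, List.flatMap_nil, List.append_nil]
    rw [evBucket_append_ne m i 0 (by rw [hr]; decide),
        evBucket_append_ne m i 2 (by rw [hr]; decide),
        evBucket_append_eq m i 4 hr,
        evBucket_append_ne m i 6 (by rw [hr]; decide),
        evBucket_append_ne m i 8 (by rw [hr]; decide)]
    simp [List.append_assoc]
  · -- last digit 6
    have hsplit : evShape m = (evBucket m 0 ++ (evBucket m 2 ++ evBucket m 4)) ++ (evBucket m 6 ++ evBucket m 8) := by
      simp [evShape, List.flatMap_cons, List.flatMap_nil, List.append_assoc]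
    rw [hsplit]
    obtain ⟨htw, hdw⟩ := tw_dw_split (fun y => decide (PySem.Int.mod y 10 < PySem.Int.mod i 10)) (evBucket m 0 ++ (evBucket m 2 ++ evBucket m 4)) (evBucket m 6 ++ evBucket m 8)
      (all_append (fun y => decide (PySem.Int.mod y 10 < PySem.Int.mod i 10)) (evBucket m 0) (evBucket m 2 ++ evBucket m 4) true (p_on_bucket m 0 i true (by rw [hr]; decide)) (all_append (fun y => decide (PySem.Int.mod y 10 < PySem.Int.mod i 10)) (evBucket m 2) (evBucket m 4) true (p_on_bucket m 2 i true (by rw [hr]; decide)) (p_on_bucket m 4 i true (by rw [hr]; decide))))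
      (all_append (fun y => decide (PySem.Int.mod y 10 < PySem.Int.mod i 10)) (evBucket m 6) (evBucket m 8) false (p_on_bucket m 6 i false (by rw [hr]; decide)) (p_on_bucket m 8 i false (by rw [hr]; decide)))
    rw [htw, hdw]
    simp only [evShape, List.flatMap_cons, List.flatMap_nil, List.append_nil]
    rw [evBucket_append_ne m i 0 (by rw [hr]; decide),
        evBucket_append_ne m i 2 (by rw [hr]; decide),
        evBucket_append_ne m i 4 (by rw [hr]; decide),
        evBucket_append_eq m i 6 hr,
        evBucket_append_ne m i 8 (by rw [hr]; decide)]
    simp [List.append_assoc]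
  · -- last digit 8
    have hsplit : evShape m = (evBucket m 0 ++ (evBucket m 2 ++ (evBucket m 4 ++ evBucket m 6))) ++ evBucket m 8 := by
      simp [evShape, List.flatMap_cons, List.flatMap_nil, List.append_assoc]
    rw [hsplit]
    obtain ⟨htw, hdw⟩ := tw_dw_split (fun y => decide (PySem.Int.mod y 10 < PySem.Int.mod i 10)) (evBucket m 0 ++ (evBucket m 2 ++ (evBucket m 4 ++ evBucket m 6))) (evBucket m 8)
      (all_append (fun y => decide (PySem.Int.mod y 10 < PySem.Int.mod i 10)) (evBucket m 0) (evBucket m 2 ++ (evBucket m 4 ++ evBucket m 6)) true (p_on_bucket m 0 i true (by rw [hr]; decide)) (all_append (fun y => decide (PySem.Int.mod y 10 < PySem.Int.mod i 10)) (evBucket m 2) (evBucket m 4 ++ evBucket m 6) true (p_on_bucket m 2 i true (by rw [hr]; decide)) (all_append (fun y => decide (PySem.Int.mod y 10 < PySem.Int.mod i 10)) (evBucket m 4) (evBucket m 6) true (p_on_bucket m 4 i true (by rw [hr]; decide)) (p_on_bucket m 6 i true (by rw [hr]; decide)))))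
      (p_on_bucket m 8 i false (by rw [hr]; decide))
    rw [htw, hdw]
    simp only [evShape, List.flatMap_cons, List.flatMap_nil, List.append_nil]
    rw [evBucket_append_ne m i 0 (by rw [hr]; decide),
        evBucket_append_ne m i 2 (by rw [hr]; decide),
        evBucket_append_ne m i 4 (by rw [hr]; decide),
        evBucket_append_ne m i 6 (by rw [hr]; decide),
        evBucket_append_eq m i 8 hr]
    simp [List.append_assoc]

-- A's even loop computes the bucket concatenation
lemma even_fold_eq (m : List Int) (hm : ∀ x ∈ m, PySem.Int.mod x 2 = 0) :
    m.foldl (fun e i => PySem.List.sorted (i :: e) (fun x => PySem.Int.mod x 10) false) [] =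
      evShape m := by
  induction m using List.reverseRecOn with
  | nil => simp [evShape, evBucket]
  | append_singleton m x ih =>
      rw [List.foldl_append]
      rw [ih (fun y hy => hm y (by simp [hy]))]
      simp only [List.foldl_cons, List.foldl_nil]
      exact sorted_cons_evShape m x (hm x (by simp))

-- A's odd loop is one sort
lemma odd_fold_eq (m : List Int) :
    m.foldl (fun o i => PySem.List.sorted (i :: o) (fun x => -x) false) [] =
      PySem.List.sorted m (fun x => -x) false := by
  induction m using List.reverseRecOn with
  | nil => rfl
  | append_singleton m x ih =>
      rw [List.foldl_append, ih]
      simp only [List.foldl_cons, List.foldl_nil]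
      have h1 : PySem.List.sorted (x :: PySem.List.sorted m (fun x => -x) false)
          (fun x : Int => -x) false = PySem.List.sorted (x :: m) (fun x => -x) false :=
        PySem.List.sorted_eq_sorted_of_perm _ _ _ neg_injective
          (List.Perm.cons x (PySem.List.sorted_perm m _ _))
      rw [h1]
      exact PySem.List.sorted_eq_sorted_of_perm _ _ _ neg_injective
        (List.perm_append_singleton x m).symm

-- the two accumulators of A's loop evolve independently
lemma func_eq_folds (nums : List Int) :
    func nums =
      nums.foldl (fun o i => if PySem.Int.mod i 2 == 1 then
          PySem.List.sorted (i :: o) (fun x => -x) false else o) [] ++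
        nums.foldl (fun e i => if PySem.Int.mod i 2 == 1 then e else
          PySem.List.sorted (i :: e) (fun x => PySem.Int.mod x 10) false) [] := by
  have hbody : (fun (s : List Int × List Int) i =>
      if PySem.Int.mod i 2 == 1 then
        (PySem.List.sorted (i :: s.1) (fun x => -x) false, s.2)
      else
        (s.1, PySem.List.sorted (i :: s.2) (fun x => PySem.Int.mod x 10) false)) =
      (fun (s : List Int × List Int) i =>
        ((fun o i => if PySem.Int.mod i 2 == 1 then
            PySem.List.sorted (i :: o) (fun x => -x) false else o) s.1 i,
         (fun e i => if PySem.Int.mod i 2 == 1 then e else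
            PySem.List.sorted (i :: e) (fun x => PySem.Int.mod x 10) false) s.2 i)) := by
    funext s i
    dsimp only
    by_cases h : (PySem.Int.mod i 2 == 1) = true
    · rw [if_pos h, if_pos h, if_pos h]
    · rw [if_neg h, if_neg h, if_neg h]
  simp only [func, hbody]
  rw [PySem.List.foldl_prod_mk
    (f := fun o i => if PySem.Int.mod i 2 == 1 then
        PySem.List.sorted (i :: o) (fun x => -x) false else o)
    (g := fun e i => if PySem.Int.mod i 2 == 1 then e else
        PySem.List.sorted (i :: e) (fun x => PySem.Int.mod x 10) false)]

-- mod 2 is 0 or 1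
lemma mod2_cases (x : Int) : PySem.Int.mod x 2 = 0 ∨ PySem.Int.mod x 2 = 1 := by
  have h0 := PySem.Int.mod_nonneg x (b := 2) (by norm_num)
  have h1 := PySem.Int.mod_lt x (b := 2) (by norm_num)
  omega

-- ===== VERDICT (by name: the statement is the Claim_ definition above) =====
theorem func_spec : Claim_equal_func := by
  intro nums _
  unfold Spec_func
  rw [func_eq_folds]
  -- odd accumulator: one sort of the odd elements
  rw [PySem.List.foldl_ite_eq_foldl_filter
    (p := fun i => (PySem.Int.mod i 2 == 1) = true)
    (f := fun o i => PySem.List.sorted (i :: o) (fun x => -x) false)]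
  rw [odd_fold_eq]
  -- even accumulator: swap the if-branches, then it is a fold over the evens
  have hsw : (fun (e : List Int) i => if PySem.Int.mod i 2 == 1 then e else
      PySem.List.sorted (i :: e) (fun x => PySem.Int.mod x 10) false) =
      (fun (e : List Int) i => if ¬ ((PySem.Int.mod i 2 == 1) = true) then
        PySem.List.sorted (i :: e) (fun x => PySem.Int.mod x 10) false else e) := by
    funext e i
    dsimp only
    by_cases h : (PySem.Int.mod i 2 == 1) = true
    · rw [if_pos h, if_neg (not_not_intro h)]
    · rw [if_neg h, if_pos h]
  rw [hsw, PySem.List.foldl_ite_eq_foldl_filter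
    (p := fun i => ¬ ((PySem.Int.mod i 2 == 1) = true))
    (f := fun e i => PySem.List.sorted (i :: e) (fun x => PySem.Int.mod x 10) false)]
  simp only [decide_not, Bool.decide_coe]
  rw [even_fold_eq _ (by
    intro x hx
    rw [List.mem_filter] at hx
    rcases mod2_cases x with h | h
    · exact h
    · rw [h] at hx
      simp at hx)]
  -- B's side
  simp only [func_alt]
  rw [PySem.List.foldl_append_eq_flatMap
    (g := fun r => (nums.filter
      (fun x => PySem.Int.mod x 2 == 0 && PySem.Int.mod x 10 == r)).reverse)]
  simp only [List.nil_append]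
  -- the odd filters agree, and each even bucket agrees
  have hbucket : ∀ r : Int,
      evBucket (nums.filter (fun x => !(PySem.Int.mod x 2 == 1))) r =
        (nums.filter
          (fun x => PySem.Int.mod x 2 == 0 && PySem.Int.mod x 10 == r)).reverse := by
    intro r
    unfold evBucket
    rw [List.filter_filter]
    congr 1
    apply List.filter_congr
    intro x _
    rcases mod2_cases x with h | h <;> rw [h] <;> simp [Bool.and_comm]
  congr 1
  simp only [evShape]
  exact List.flatMap_congr (fun r _ => hbucket r)
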